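-- pv_equiv track=rewrite | github.com/tzy82065/MAPF-Considering-Turn-Delays | MAPF-Considering-Turn-Delays/experiment/Sequential_Astar_test.py | simplify_ending
-- ===== SOURCE A (Python) =====
-- def simplify_ending(plan_x, plan_y):
--     true_rx, true_ry = [], []
--     for k in range(len(plan_x)):
--         index = len(plan_x[k]) - 1
--         while index > 0 and plan_x[k][index] == plan_x[k][index - 1] and plan_y[k][index] == plan_y[k][index - 1]:
--             index -= 1
--         # 保留从开始到第一个不重复元素的所有元素，同时保留最后一个重复的元素
--         true_rx.append(plan_x[k][:index + 1])
--         true_ry.append(plan_y[k][:index + 1])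
--     return true_rx, true_ry
-- ===== SOURCE B (Python) =====
-- def simplify_ending(plan_x, plan_y):
--     # Two-stage decomposition: the trailing run where BOTH coordinates repeat is the
--     # intersection of the trailing constant-x run and (within it) the constant-y run.
--     ends = []
--     for k in range(len(plan_x)):
--         xs, ys = plan_x[k], plan_y[k]
--         s = len(xs) - 1
--         while s > 0 and xs[s] == xs[s - 1]:
--             s -= 1
--         i = len(xs) - 1
--         while i > s and ys[i] == ys[i - 1]:
--             i -= 1
--         ends.append(i + 1)
--     true_rx = [plan_x[k][:ends[k]] for k in range(len(plan_x))]
--     true_ry = [plan_y[k][:ends[k]] for k in range(len(plan_x))]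
--     return true_rx, true_ry
-- ===== Notes on version B (the rewrite author's own statement) =====
-- stated objective: alternative
-- what changed: Replaces A's single backward while-loop testing x-equality and y-equality together with a two-stage decomposition: first find the trailing constant-x run, then (only within that run) the trailing constant-y run, collect all cut indices, and build both outputs by slicing comprehensions over those indices.
import Mathlib
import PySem

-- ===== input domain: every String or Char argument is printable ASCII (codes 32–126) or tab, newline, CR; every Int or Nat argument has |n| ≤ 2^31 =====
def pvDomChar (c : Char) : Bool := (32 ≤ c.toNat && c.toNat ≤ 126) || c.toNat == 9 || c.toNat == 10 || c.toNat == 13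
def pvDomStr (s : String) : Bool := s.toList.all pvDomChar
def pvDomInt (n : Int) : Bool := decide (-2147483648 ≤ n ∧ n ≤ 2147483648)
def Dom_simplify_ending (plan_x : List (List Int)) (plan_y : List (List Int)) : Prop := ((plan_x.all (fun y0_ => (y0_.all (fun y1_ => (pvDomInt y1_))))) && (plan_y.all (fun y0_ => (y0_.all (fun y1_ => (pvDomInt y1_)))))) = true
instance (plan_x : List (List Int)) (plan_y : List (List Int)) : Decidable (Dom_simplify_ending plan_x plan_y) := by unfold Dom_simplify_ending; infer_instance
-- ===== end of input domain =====

-- B decomposes A's combined trailing-run scan into a constant-x run scan followed by a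
-- constant-y scan restricted to it, then builds the outputs by slicing (alternative decomposition, same cost).


-- ===== PORT A =====
-- A's backward while-loop: from index = len-1, step left while both coordinates equal
-- their predecessors.  Index as Nat; Python's index = -1 on an empty path is handled by
-- the `length = 0` branch in the caller, giving slice length 0 exactly as plan_x[k][:0].
def pvWhileA (xs ys : List Int) : Nat → Nat
  | 0 => 0
  | i + 1 =>
    if xs.getD (i + 1) 0 = xs.getD i 0 ∧ ys.getD (i + 1) 0 = ys.getD i 0 then
      pvWhileA xs ys i
    else i + 1

def simplify_ending (plan_x : List (List Int)) (plan_y : List (List Int)) : List (List Int) × List (List Int) :=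
  (List.range plan_x.length).foldl
    (fun acc k =>
      let xs := plan_x.getD k []
      let ys := plan_y.getD k []
      -- index = len(xs)-1; while …: index -= 1; slice end = index+1 (0 when xs empty)
      let stop : Nat := if xs.length = 0 then 0 else pvWhileA xs ys (xs.length - 1) + 1
      (acc.1 ++ [xs.take stop], acc.2 ++ [ys.take stop]))
    ([], [])

-- ===== PORT B =====
-- stage 1: `while s > 0 and xs[s] == xs[s-1]: s -= 1`
def pvXRun (xs : List Int) : Nat → Nat
  | 0 => 0
  | s + 1 => if xs.getD (s + 1) 0 = xs.getD s 0 then pvXRun xs s else s + 1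

-- stage 2: `while i > s and ys[i] == ys[i-1]: i -= 1`; the counter `d = i - s`
-- makes the recursion structural (a plain fuel rendering of the same loop).
def pvYRunAux (ys : List Int) : Nat → Nat → Nat
  | i, 0 => i
  | i, d + 1 => if ys.getD i 0 = ys.getD (i - 1) 0 then pvYRunAux ys (i - 1) d else i

-- end index for one path k (0 for an empty path, as in Python)
def pvEnd (xs ys : List Int) : Nat :=
  if xs.length = 0 then 0
  else
    let s := pvXRun xs (xs.length - 1)
    pvYRunAux ys (xs.length - 1) ((xs.length - 1) - s) + 1

def simplify_ending_alt (plan_x : List (List Int)) (plan_y : List (List Int)) : List (List Int) × List (List Int) :=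
  let ends := (List.range plan_x.length).map (fun k => pvEnd (plan_x.getD k []) (plan_y.getD k []))
  ((List.range plan_x.length).map (fun k => (plan_x.getD k []).take (ends.getD k 0)),
   (List.range plan_x.length).map (fun k => (plan_y.getD k []).take (ends.getD k 0)))

-- ===== PRECONDITION & SPEC =====
-- Pre_ excludes exactly the inputs on which A raises IndexError: plan_y shorter than
-- plan_x (plan_y[k] missing), or some path whose last two x-coordinates are equal while
-- its y-path is shorter than its x-path (then plan_y[k][len-1] is out of range).
def Pre_simplify_ending (plan_x : List (List Int)) (plan_y : List (List Int)) : Prop :=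
  plan_x.length ≤ plan_y.length ∧
  ∀ k, k < plan_x.length →
    (2 ≤ (plan_x.getD k []).length ∧
      (plan_x.getD k []).getD ((plan_x.getD k []).length - 1) 0
        = (plan_x.getD k []).getD ((plan_x.getD k []).length - 2) 0) →
    (plan_x.getD k []).length ≤ (plan_y.getD k []).length
instance (plan_x : List (List Int)) (plan_y : List (List Int)) : Decidable (Pre_simplify_ending plan_x plan_y) := by unfold Pre_simplify_ending; infer_instance
def pvWitness_simplify_ending : List (List Int) × List (List Int) :=
  ([[1, 1], [2, 3, 3]], [[4, 4], [5, 6, 6]])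

def Spec_simplify_ending (plan_x : List (List Int)) (plan_y : List (List Int)) (out : List (List Int) × List (List Int)) : Prop := out = simplify_ending_alt plan_x plan_y
instance (plan_x : List (List Int)) (plan_y : List (List Int)) (out : List (List Int) × List (List Int)) : Decidable (Spec_simplify_ending plan_x plan_y out) := by unfold Spec_simplify_ending; infer_instance

-- ===== CLAIM (what is proved, stated in full; the proofs are below) =====
def Claim_equal_simplify_ending : Prop := ∀ (plan_x : List (List Int)) (plan_y : List (List Int)), Dom_simplify_ending plan_x plan_y → Pre_simplify_ending plan_x plan_y → Spec_simplify_ending plan_x plan_y (simplify_ending plan_x plan_y)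

-- ===== LEMMAS AND PROOFS =====

theorem pvXRun_le (xs : List Int) (j : Nat) : pvXRun xs j ≤ j := by
  induction j with
  | zero => simp [pvXRun]
  | succ j ih => simp only [pvXRun]; split <;> omega

-- A's combined backward scan equals the x-run scan followed by the bounded y-scan.
theorem pvWhileA_eq (xs ys : List Int) (j : Nat) :
    pvWhileA xs ys j = pvYRunAux ys j (j - pvXRun xs j) := by
  induction j with
  | zero => simp [pvWhileA, pvXRun, pvYRunAux]
  | succ j ih =>
    by_cases hx : xs[j+1]?.getD 0 = xs[j]?.getD 0
    · have hs : pvXRun xs (j + 1) = pvXRun xs j := by simp [pvXRun, hx]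
      have hle := pvXRun_le xs j
      have hd : j + 1 - pvXRun xs (j + 1) = (j - pvXRun xs j) + 1 := by rw [hs]; omega
      by_cases hy : ys[j+1]?.getD 0 = ys[j]?.getD 0
      · have : pvWhileA xs ys (j + 1) = pvWhileA xs ys j := by
          simp [pvWhileA, hx, hy]
        rw [this, ih, hd]
        simp [pvYRunAux, hy]
      · have : pvWhileA xs ys (j + 1) = j + 1 := by simp [pvWhileA, hy]
        rw [this, hd]
        simp [pvYRunAux, hy]
    · have hs : pvXRun xs (j + 1) = j + 1 := by simp [pvXRun, hx]
      have : pvWhileA xs ys (j + 1) = j + 1 := by simp [pvWhileA, hx]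
      rw [this, hs]
      simp [pvYRunAux]

theorem stop_eq (xs ys : List Int) :
    (if xs.length = 0 then 0 else pvWhileA xs ys (xs.length - 1) + 1) = pvEnd xs ys := by
  unfold pvEnd
  split
  · rfl
  · rw [pvWhileA_eq]

-- the accumulate-by-append loop produces the maps of the per-index values
theorem foldl_pair_append {α : Type} (f g : Nat → List α) (l : List Nat)
    (a b : List (List α)) :
    l.foldl (fun acc k => (acc.1 ++ [f k], acc.2 ++ [g k])) (a, b)
      = (a ++ l.map f, b ++ l.map g) := by
  induction l generalizing a b with
  | nil => simp
  | cons x xs ih => simp [ih]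

theorem getD_map_range {α : Type} [Inhabited α] (n : Nat) (f : Nat → α) (k : Nat)
    (hk : k < n) (d : α) : ((List.range n).map f).getD k d = f k := by
  rw [List.getD_eq_getElem?_getD, List.getElem?_map, List.getElem?_range hk]
  rfl

theorem ports_eq (plan_x plan_y : List (List Int)) :
    simplify_ending plan_x plan_y = simplify_ending_alt plan_x plan_y := by
  unfold simplify_ending simplify_ending_alt
  rw [foldl_pair_append]
  simp only [List.nil_append, Prod.mk.injEq]
  constructor <;>
  · apply List.map_congr_left
    intro k hk
    have hk' : k < plan_x.length := List.mem_range.mp hk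
    rw [getD_map_range _ _ _ hk', stop_eq]

-- ===== VERDICT (by name: the statement is the Claim_ definition above) =====
theorem simplify_ending_spec : Claim_equal_simplify_ending := by
  intro plan_x plan_y _ _
  exact ports_eq plan_x plan_y
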